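-- pv_equiv track=rewrite | github.com/Ivanyinfan/LeetCode | Google-2.py | solution
-- ===== SOURCE A (Python) =====
-- from typing import List
-- from collections import Counter
--
-- def solution(A:List[str]) -> int:
--     counter,r,f = Counter(A),0,False
--     while len(counter)!=0:
--         k,v = counter.popitem()
--         if k[0]==k[1]: r,f=r+v//2*4, f or v%2
--         else: r = r + min(v, counter.pop(k[::-1],0))*4
--     if f: r = r + 2
--     return r
-- ===== SOURCE B (Python) =====
-- from typing import List
-- from collections import Counter
--
-- def solution(A: List[str]) -> int:
--     counter = Counter(A)
--     r = 0
--     central = False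
--     for k, v in counter.items():
--         if k[0] == k[1]:
--             r += v // 2 * 4
--             central = central or v % 2 == 1
--         elif k < k[::-1]:
--             r += min(v, counter[k[::-1]]) * 4
--     return r + 2 if central else r
-- ===== Notes on version B (the rewrite author's own statement) =====
-- stated objective: idiomatic
-- what changed: Replaces the destructive while-popitem/pop loop that consumes the Counter with a single non-destructive pass over a static Counter, counting each mirror pair once via a lexicographic k < k[::-1] guard and a central flag.
-- outside the precondition, e.g. on solution(['aab', 'baa']): A returns 4, B returns 2; on solution(['baa', 'aab']): A returns 2, B returns 2
import Mathlib
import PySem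

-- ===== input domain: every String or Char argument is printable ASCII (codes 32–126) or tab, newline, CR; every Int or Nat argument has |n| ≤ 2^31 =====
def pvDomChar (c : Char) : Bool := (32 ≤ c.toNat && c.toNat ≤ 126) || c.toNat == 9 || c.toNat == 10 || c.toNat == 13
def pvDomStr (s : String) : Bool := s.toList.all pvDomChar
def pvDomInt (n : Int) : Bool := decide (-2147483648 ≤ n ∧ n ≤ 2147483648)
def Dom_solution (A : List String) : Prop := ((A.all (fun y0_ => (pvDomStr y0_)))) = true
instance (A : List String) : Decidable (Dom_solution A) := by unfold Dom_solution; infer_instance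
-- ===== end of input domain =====

-- B replaces A's destructive popitem/pop consumption of the Counter with one
-- non-destructive pass over the static Counter, counting each mirror pair once
-- via a lexicographic k < k[::-1] guard and a central flag (idiomatic; same cost).

-- ===== PORT A =====
-- Counter(A): association list in key-insertion order, counts as values.
def pvBump : List (String × Int) → String → List (String × Int)
  | [], k => [(k, 1)]
  | (k', v) :: t, k => if k' = k then (k', v + 1) :: t else (k', v) :: pvBump t k

def pvCounter (A : List String) : List (String × Int) := A.foldl pvBump []

-- k[::-1]
def pvStrRev (k : String) : String := String.ofList k.toList.reverse

-- counter[x] with Counter's 0 default (also counter.pop(x, 0)'s returned value)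
def pvLookup0 (c : List (String × Int)) (x : String) : Int :=
  ((c.find? (fun p => p.1 == x)).map Prod.snd).getD 0

-- A's while-loop.  popitem() pops the LAST-inserted key, so the loop walks the
-- REVERSED counter list; counter.pop(k[::-1], 0) is modelled as pvLookup0 (the
-- returned value) plus eraseP (the removal).  The `| _ => 0` arm is where
-- Python raises IndexError (a string shorter than 2); excluded by Pre_.
def pvLoopA : List (String × Int) → Int → Bool → Int
  | [], r, f => if f then r + 2 else r
  | (k, v) :: rest, r, f =>
    match k.toList with
    | a :: b :: _ =>
      if a = b then
        pvLoopA rest (r + PySem.Int.floordiv v 2 * 4) (f || !(PySem.Int.mod v 2 == 0))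
      else
        pvLoopA (rest.eraseP (fun p => p.1 == pvStrRev k))
          (r + min v (pvLookup0 rest (pvStrRev k)) * 4) f
    | _ => 0
termination_by c => c.length
decreasing_by
  · simp
  · exact Nat.lt_succ_of_le List.length_eraseP_le

def solution (A : List String) : Int := pvLoopA (pvCounter A).reverse 0 false

-- ===== PORT B =====
-- one loop-body step of Source B; `| _ => acc` is where Python raises IndexError (excluded by Pre_)
def pvStepB (c : List (String × Int)) (acc : Int × Bool) (kv : String × Int) : Int × Bool :=
  match kv.1.toList with
  | a :: b :: _ =>
    if a = b then
      (acc.1 + PySem.Int.floordiv kv.2 2 * 4, acc.2 || (PySem.Int.mod kv.2 2 == 1))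
    else if kv.1 < pvStrRev kv.1 then
      (acc.1 + min kv.2 (pvLookup0 c (pvStrRev kv.1)) * 4, acc.2)
    else acc
  | _ => acc

def solution_alt (A : List String) : Int :=
  let c := pvCounter A
  let acc := c.foldl (pvStepB c) (0, false)
  if acc.2 then acc.1 + 2 else acc.1

-- ===== PRECONDITION & SPEC =====
-- "k[0] == k[1]": the word's first two characters coincide
def pvSelf (s : String) : Bool :=
  match s.toList with
  | a :: b :: _ => a == b
  | _ => false

-- Pre_ excludes (i) lists containing a string shorter than 2 characters, on
-- which A raises IndexError, and (ii) lists containing both a word s with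
-- s[0]==s[1] and its distinct reverse t with t[0]!=t[1] (e.g. 'aab' and 'baa'):
-- there A's value is an accidental artefact of dict pop order (['aab','baa'] → 4
-- but ['baa','aab'] → 2), so neither value is specified.
def Pre_solution (A : List String) : Prop :=
  (∀ s ∈ A, 2 ≤ s.toList.length) ∧
    ¬ ∃ s ∈ A, ∃ t ∈ A, pvStrRev s = t ∧ s ≠ t ∧ pvSelf s = true ∧ pvSelf t = false
instance (A : List String) : Decidable (Pre_solution A) := by unfold Pre_solution; infer_instance
def pvWitness_solution : List String := ["ab", "ba", "cc", "cc", "ab"]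

def Spec_solution (A : List String) (out : Int) : Prop := out = solution_alt A
instance (A : List String) (out : Int) : Decidable (Spec_solution A out) := by unfold Spec_solution; infer_instance

-- ===== CLAIM (what is proved, stated in full; the proofs are below) =====
def Claim_equal_solution : Prop := ∀ (A : List String), Dom_solution A → Pre_solution A → Spec_solution A (solution A)

-- ===== LEMMAS AND PROOFS =====

-- contribution of one counter entry to B's r (lookups in the full counter c)
def pvContrib (c : List (String × Int)) (kv : String × Int) : Int :=
  match kv.1.toList with
  | a :: b :: _ =>
    if a = b then PySem.Int.floordiv kv.2 2 * 4
    else if kv.1 < pvStrRev kv.1 then min kv.2 (pvLookup0 c (pvStrRev kv.1)) * 4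
    else 0
  | _ => 0

-- does one entry set B's central flag?
def pvFlag (kv : String × Int) : Bool :=
  match kv.1.toList with
  | a :: b :: _ => decide (a = b) && (PySem.Int.mod kv.2 2 == 1)
  | _ => false

def pvS (c l : List (String × Int)) : Int := (l.map (pvContrib c)).sum
def pvF (l : List (String × Int)) : Bool := l.any pvFlag

lemma stepB_foldl (c : List (String × Int)) :
    ∀ (l : List (String × Int)) (r : Int) (f : Bool),
      l.foldl (pvStepB c) (r, f) = (r + pvS c l, f || pvF l) := by
  intro l
  induction l with
  | nil => intro r f; simp [pvS, pvF]
  | cons kv t ih =>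
    intro r f
    simp only [List.foldl_cons, pvS, pvF, List.map_cons, List.sum_cons, List.any_cons]
    rw [show pvStepB c (r, f) kv =
        (r + pvContrib c kv, f || pvFlag kv) from ?_, ih]
    · simp only [Prod.mk.injEq]
      exact ⟨by simp [pvS]; ring, by simp [pvF, Bool.or_assoc]⟩
    · simp only [pvStepB, pvContrib, pvFlag]
      cases h : kv.1.toList with
      | nil => simp
      | cons a tl =>
        cases tl with
        | nil => simp
        | cons b tl' =>
          by_cases hab : a = b
          · simp [hab]
          · by_cases hlt : kv.1 < pvStrRev kv.1 <;> simp [hab, hlt]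

lemma lookup0_cons_of_ne (k : String) (v : Int) (t : List (String × Int)) (x : String)
    (h : k ≠ x) : pvLookup0 ((k, v) :: t) x = pvLookup0 t x := by
  simp [pvLookup0, List.find?_cons_of_neg, h]

lemma lookup0_cons_self (k : String) (v : Int) (t : List (String × Int)) :
    pvLookup0 ((k, v) :: t) k = v := by
  simp [pvLookup0, List.find?_cons_of_pos]

lemma lookup0_eraseP_of_ne (y x : String) (h : x ≠ y) :
    ∀ (l : List (String × Int)),
      pvLookup0 (l.eraseP (fun p => p.1 == y)) x = pvLookup0 l x := by
  intro l
  induction l with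
  | nil => simp
  | cons kv t ih =>
    by_cases hk : kv.1 = y
    · rw [List.eraseP_cons_of_pos (by simp [hk]),
        lookup0_cons_of_ne _ _ _ _ (by rw [hk]; exact fun hc => h hc.symm)]
    · rw [List.eraseP_cons_of_neg (by simp [hk])]
      by_cases hx : kv.1 = x
      · obtain ⟨k, v⟩ := kv
        simp only at hx; subst hx
        rw [lookup0_cons_self, lookup0_cons_self]
      · rw [lookup0_cons_of_ne _ _ _ _ hx, lookup0_cons_of_ne _ _ _ _ hx, ih]

-- strings with the same character list are equal
lemma str_eq_iff_toList (s t : String) : s = t ↔ s.toList = t.toList :=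
  ⟨fun h => h ▸ rfl, String.toList_inj.mp⟩

lemma toList_strRev (s : String) : (pvStrRev s).toList = s.toList.reverse := by
  simp [pvStrRev]

lemma strRev_strRev (s : String) : pvStrRev (pvStrRev s) = s := by
  rw [str_eq_iff_toList, toList_strRev, toList_strRev, List.reverse_reverse]

lemma strRev_eq_iff_eq_strRev (s t : String) : pvStrRev s = t ↔ s = pvStrRev t :=
  ⟨fun h => by rw [← h, strRev_strRev], fun h => by rw [h, strRev_strRev]⟩

lemma exists_two (s : String) (h : 2 ≤ s.toList.length) :
    ∃ a b tl, s.toList = a :: b :: tl := by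
  cases hs : s.toList with
  | nil => simp [hs] at h
  | cons x tl =>
    cases tl with
    | nil => simp [hs] at h
    | cons y tl' => exact ⟨x, y, tl', rfl⟩

-- the contribution only consults c when the entry is a non-self word
lemma contrib_eq_of_lookup (c c' : List (String × Int)) (kv : String × Int)
    (h : pvSelf kv.1 = false →
      pvLookup0 c (pvStrRev kv.1) = pvLookup0 c' (pvStrRev kv.1)) :
    pvContrib c kv = pvContrib c' kv := by
  simp only [pvContrib]
  cases hl : kv.1.toList with
  | nil => rfl
  | cons a tl =>
    cases tl with
    | nil => rfl
    | cons b tl' =>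
      by_cases hab : a = b
      · simp [hab]
      · rw [h (by simp [pvSelf, hl, hab])]

lemma S_congr (c c' l : List (String × Int))
    (h : ∀ kv ∈ l, pvSelf kv.1 = false →
      pvLookup0 c (pvStrRev kv.1) = pvLookup0 c' (pvStrRev kv.1)) :
    pvS c l = pvS c' l := by
  unfold pvS
  rw [List.map_eq_map_iff.mpr (fun kv hkv => contrib_eq_of_lookup _ _ _ (h kv hkv))]

-- the main invariant: A's destructive loop computes B's non-destructive totals,
-- for counters with distinct keys of length ≥ 2, positive counts, and no
-- self-word/non-self-word mirror conflict
lemma loopA_eq : ∀ (n : Nat) (l : List (String × Int)), l.length ≤ n →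
    (l.map Prod.fst).Nodup →
    (∀ kv ∈ l, 2 ≤ kv.1.toList.length) →
    (∀ kv ∈ l, 1 ≤ kv.2) →
    (∀ kv ∈ l, ∀ kv' ∈ l, pvStrRev kv.1 = kv'.1 →
      pvSelf kv.1 = true → pvSelf kv'.1 = true) →
    ∀ (r : Int) (f : Bool),
      pvLoopA l r f = (if f || pvF l then r + pvS l l + 2 else r + pvS l l) := by
  intro n
  induction n with
  | zero =>
    intro l hl _ _ _ _ r f
    have : l = [] := List.eq_nil_of_length_eq_zero (Nat.le_zero.mp hl)
    subst this
    simp [pvLoopA, pvS, pvF]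
  | succ n ih =>
    intro l hl hnd hlen hpos hconf r f
    match l with
    | [] => simp [pvLoopA, pvS, pvF]
    | (k, v) :: rest =>
      obtain ⟨a, b, tl, hk⟩ := exists_two k (hlen (k, v) (by simp))
      simp only [List.map_cons, List.nodup_cons, List.mem_map] at hnd
      obtain ⟨hkfresh, hndr⟩ := hnd
      have hrestlen : rest.length ≤ n := by
        simpa using Nat.le_of_succ_le_succ (by simpa using hl)
      have hlenr : ∀ kv ∈ rest, 2 ≤ kv.1.toList.length :=
        fun kv hkv => hlen kv (List.mem_cons_of_mem _ hkv)
      have hposr : ∀ kv ∈ rest, 1 ≤ kv.2 :=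
        fun kv hkv => hpos kv (List.mem_cons_of_mem _ hkv)
      have hconfr : ∀ kv ∈ rest, ∀ kv' ∈ rest, pvStrRev kv.1 = kv'.1 →
          pvSelf kv.1 = true → pvSelf kv'.1 = true :=
        fun kv hkv kv' hkv' => hconf kv (List.mem_cons_of_mem _ hkv)
          kv' (List.mem_cons_of_mem _ hkv')
      rw [pvLoopA]
      simp only [hk]
      by_cases hab : a = b
      · -- self-mirror word: k[0] == k[1]
        subst hab
        have hselfk : pvSelf k = true := by simp [pvSelf, hk]
        rw [if_pos rfl, ih rest hrestlen hndr hlenr hposr hconfr]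
        have hSrest : pvS ((k, v) :: rest) rest = pvS rest rest := by
          apply S_congr
          intro kv hkv hself
          apply lookup0_cons_of_ne
          intro hc
          -- k's mirror kv would be a non-self word reversing to the self word k
          have := hconf (k, v) (by simp) kv (List.mem_cons_of_mem _ hkv)
            ((strRev_eq_iff_eq_strRev ..).mpr hc) hselfk
          simp [hself] at this
        have hcontrib : pvContrib ((k, v) :: rest) (k, v) = PySem.Int.floordiv v 2 * 4 := by
          simp [pvContrib, hk]
        have hflag : pvFlag (k, v) = (PySem.Int.mod v 2 == 1) := by
          simp [pvFlag, hk]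
        have hmod : (!(PySem.Int.mod v 2 == 0)) = (PySem.Int.mod v 2 == 1) := by
          have h2 := PySem.Int.mod_two_eq v
          rcases h2 with h2 | h2 <;> rw [h2] <;> decide
        simp only [pvS, pvF, List.map_cons, List.sum_cons, List.any_cons, hcontrib, hflag, hmod]
        have h4 : (rest.map (pvContrib ((k, v) :: rest))).sum =
            (rest.map (pvContrib rest)).sum := hSrest
        rw [h4]
        rw [Bool.or_assoc]
        split <;> ring
      · -- distinct first characters: A pairs k with the mirror word
        rw [if_neg hab]
        have hselfk : pvSelf k = false := by simp [pvSelf, hk, hab]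
        have hfK : pvFlag (k, v) = false := by simp [pvFlag, hk, hab]
        by_cases hmem : ∀ p ∈ rest, p.1 ≠ pvStrRev k
        · -- the mirror word is absent from the rest: pop returns the default 0
          have herase : rest.eraseP (fun p => p.1 == pvStrRev k) = rest :=
            List.eraseP_of_forall_not (fun p hp => by simp [hmem p hp])
          have hfn : rest.find? (fun p => p.1 == pvStrRev k) = none :=
            List.find?_eq_none.mpr (fun p hp => by simp [hmem p hp])
          have hw : pvLookup0 rest (pvStrRev k) = 0 := by
            simp [pvLookup0, hfn]
          have hv1 := hpos (k, v) (by simp)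
          have hmin : min v (0 : Int) = 0 := by omega
          rw [herase, hw, hmin, ih rest hrestlen hndr hlenr hposr hconfr]
          have hc0 : pvContrib ((k, v) :: rest) (k, v) = 0 := by
            by_cases hpal : pvStrRev k = k
            · -- palindromic word: k < k[::-1] is irreflexive
              simp only [pvContrib, hk, if_neg hab, hpal]
              rw [if_neg (lt_irrefl k)]
            · have hlk : pvLookup0 ((k, v) :: rest) (pvStrRev k) = 0 := by
                rw [lookup0_cons_of_ne _ _ _ _ (fun hc => hpal hc.symm), hw]
              simp only [pvContrib, hk, if_neg hab, hlk, hmin]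
              split <;> ring
          have hSrest : pvS ((k, v) :: rest) rest = pvS rest rest := by
            apply S_congr
            intro kv hkv _
            apply lookup0_cons_of_ne
            intro hc
            exact hmem kv hkv ((strRev_eq_iff_eq_strRev ..).mp hc.symm)
          simp only [pvS, pvF, List.map_cons, List.sum_cons, List.any_cons, hfK,
            Bool.false_or]
          have h4 : (rest.map (pvContrib ((k, v) :: rest))).sum =
              (rest.map (pvContrib rest)).sum := hSrest
          rw [h4, hc0]
          split <;> ring
        · -- the mirror word is present with multiplicity p'.2
          push Not at hmem
          obtain ⟨p, hp, hpk⟩ := hmem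
          obtain ⟨p', l₁, l₂, hnot1, hp', heq, herase⟩ :=
            List.exists_of_eraseP (p := fun q => q.1 == pvStrRev k) hp (by simpa using hpk)
          have hp'k : p'.1 = pvStrRev k := by simpa using hp'
          have hkne : pvStrRev k ≠ k := by
            intro hc
            exact hkfresh ⟨p', heq ▸ List.mem_append_right _ (List.mem_cons_self ..),
              hp'k.trans hc⟩
          have hrr : pvStrRev p'.1 = k := by rw [hp'k, strRev_strRev]
          have hselfp' : pvSelf p'.1 = false := by
            by_contra hc
            have := hconf p' (heq ▸ List.mem_cons_of_mem _
              (List.mem_append_right _ (List.mem_cons_self ..))) (k, v) (by simp)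
              hrr (by revert hc; cases pvSelf p'.1 <;> simp)
            simp [hselfk] at this
          obtain ⟨a', b', tl', hp'list⟩ := exists_two p'.1
            (hlenr p' (heq ▸ List.mem_append_right _ (List.mem_cons_self ..)))
          have hab' : ¬ a' = b' := by
            intro hc
            simp [pvSelf, hp'list, hc] at hselfp'
          have hfind : rest.find? (fun q => q.1 == pvStrRev k) = some p' := by
            have h0 : l₁.find? (fun q => q.1 == pvStrRev k) = none :=
              List.find?_eq_none.mpr hnot1
            rw [heq, List.find?_append, h0, Option.none_or,
              List.find?_cons_of_pos (p := fun q : String × Int => q.1 == pvStrRev k) hp']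
          have hw : pvLookup0 rest (pvStrRev k) = p'.2 := by
            simp [pvLookup0, hfind]
          have hsub : (l₁ ++ l₂).Sublist rest := herase ▸ List.eraseP_sublist
          have hndr12 : ((l₁ ++ l₂).map Prod.fst).Nodup :=
            hndr.sublist (hsub.map Prod.fst)
          have hlen12 : (l₁ ++ l₂).length ≤ n := by
            have := herase ▸ (List.length_eraseP_le
              (l := rest) (p := fun q : String × Int => q.1 == pvStrRev k))
            omega
          -- key distinctness facts from Nodup of rest's keys
          have hndq : (l₁.map Prod.fst).Nodup ∧ (p'.1 :: l₂.map Prod.fst).Nodup ∧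
              ∀ x ∈ l₁.map Prod.fst, ∀ y ∈ p'.1 :: l₂.map Prod.fst, x ≠ y := by
            rw [heq, List.map_append, List.map_cons] at hndr
            exact List.nodup_append.mp hndr
          have hne_p' : ∀ kv ∈ l₁ ++ l₂, kv.1 ≠ p'.1 := by
            intro kv hkv hc
            rcases List.mem_append.mp hkv with h1 | h2
            · exact hndq.2.2 kv.1 (List.mem_map_of_mem h1) p'.1 (List.mem_cons_self ..) hc
            · exact (List.nodup_cons.mp hndq.2.1).1 (hc ▸ List.mem_map_of_mem h2)
          have hne_k : ∀ kv ∈ l₁ ++ l₂, kv.1 ≠ k :=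
            fun kv hkv hc => hkfresh ⟨kv, hsub.subset hkv, hc⟩
          -- lookups of surviving entries are unchanged
          have hlook12 : ∀ kv ∈ l₁ ++ l₂, pvSelf kv.1 = false →
              pvLookup0 ((k, v) :: rest) (pvStrRev kv.1) =
                pvLookup0 (l₁ ++ l₂) (pvStrRev kv.1) := by
            intro kv hkv _
            have hx1 : pvStrRev kv.1 ≠ k := by
              intro hc
              exact hne_p' kv hkv (((strRev_eq_iff_eq_strRev ..).mp hc).trans hp'k.symm)
            have hx2 : pvStrRev kv.1 ≠ pvStrRev k := by
              intro hc
              exact hne_k kv hkv (by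
                have := congrArg pvStrRev hc
                rwa [strRev_strRev, strRev_strRev] at this)
            rw [lookup0_cons_of_ne _ _ _ _ (fun hc => hx1 hc.symm), ← herase,
              lookup0_eraseP_of_ne _ _ hx2]
          have hS12 : pvS ((k, v) :: rest) (l₁ ++ l₂) = pvS (l₁ ++ l₂) (l₁ ++ l₂) :=
            S_congr _ _ _ hlook12
          -- contributions of the two paired entries
          have hlkfull : pvLookup0 ((k, v) :: rest) (pvStrRev k) = p'.2 := by
            rw [lookup0_cons_of_ne _ _ _ _ (fun hc => hkne hc.symm), hw]
          have hcK : pvContrib ((k, v) :: rest) (k, v) =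
              (if k < pvStrRev k then min v p'.2 * 4 else 0) := by
            simp only [pvContrib, hk, if_neg hab, hlkfull]
          have hcP : pvContrib ((k, v) :: rest) p' =
              (if pvStrRev k < k then min p'.2 v * 4 else 0) := by
            have h5 : pvLookup0 ((k, v) :: rest) (pvStrRev p'.1) = v := by
              rw [hrr, lookup0_cons_self]
            simp only [pvContrib, hp'list, if_neg hab', h5]
            rw [hrr, hp'k]
          have hsum : pvContrib ((k, v) :: rest) (k, v) +
              pvContrib ((k, v) :: rest) p' = min v p'.2 * 4 := by
            rw [hcK, hcP]
            rcases lt_or_gt_of_ne (fun hc : k = pvStrRev k => hkne hc.symm) with h | h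
            · rw [if_pos h, if_neg (lt_asymm h)]; ring
            · rw [if_neg (lt_asymm h), if_pos h, min_comm]; ring
          have hfP : pvFlag p' = false := by
            simp [pvFlag, hp'list, hab']
          -- flags of rest reduce to flags of the survivors
          have hF : pvF rest = pvF (l₁ ++ l₂) := by
            simp [pvF, heq, hfP]
          rw [herase, hw, ih (l₁ ++ l₂) hlen12 hndr12
            (fun kv hkv => hlenr kv (hsub.subset hkv))
            (fun kv hkv => hposr kv (hsub.subset hkv))
            (fun kv hkv kv' hkv' => hconfr kv (hsub.subset hkv) kv' (hsub.subset hkv'))]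
          have hSfull : pvS ((k, v) :: rest) ((k, v) :: rest) =
              min v p'.2 * 4 + pvS (l₁ ++ l₂) (l₁ ++ l₂) := by
            have hdecomp : ∀ c : List (String × Int), pvS c (l₁ ++ p' :: l₂) =
                pvContrib c p' + pvS c (l₁ ++ l₂) := by
              intro c
              simp only [pvS, List.map_append, List.map_cons, List.sum_append,
                List.sum_cons]
              ring
            have hhead : pvS ((k, v) :: rest) ((k, v) :: rest) =
                pvContrib ((k, v) :: rest) (k, v) + pvS ((k, v) :: rest) rest := by
              simp only [pvS, List.map_cons, List.sum_cons]
            rw [hhead, congrArg (pvS ((k, v) :: rest)) heq,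
              hdecomp ((k, v) :: rest), hS12, ← hsum]
            ring
          have hFfull : pvF ((k, v) :: rest) = pvF (l₁ ++ l₂) := by
            simp only [pvF, List.any_cons, hfK, Bool.false_or]
            exact hF
          rw [hSfull, hFfull]
          split <;> ring

lemma bump_keys (c : List (String × Int)) (k : String) :
    (pvBump c k).map Prod.fst =
      if k ∈ c.map Prod.fst then c.map Prod.fst else c.map Prod.fst ++ [k] := by
  induction c with
  | nil => simp [pvBump]
  | cons kv t ih =>
    obtain ⟨k', v⟩ := kv
    by_cases h : k' = k
    · simp [pvBump, h]
    · simp only [pvBump, if_neg h, List.map_cons, List.mem_cons, ih]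
      have : ¬ k = k' := fun hc => h hc.symm
      by_cases hm : k ∈ t.map Prod.fst <;> simp [hm, this]

lemma bump_mem (c : List (String × Int)) (k : String) :
    ∀ kv ∈ pvBump c k, (kv.1 = k ∧ kv.2 = 1) ∨ ∃ kv' ∈ c, kv.1 = kv'.1 ∧ (kv.2 = kv'.2 ∨ kv.2 = kv'.2 + 1) := by
  induction c with
  | nil => simp [pvBump]
  | cons kv0 t ih =>
    obtain ⟨k', v⟩ := kv0
    by_cases h : k' = k
    · intro kv hkv
      simp only [pvBump, if_pos h, List.mem_cons] at hkv
      rcases hkv with h1 | h2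
      · exact Or.inr ⟨(k', v), by simp, by simp [h1]⟩
      · exact Or.inr ⟨kv, by simp [h2], by simp⟩
    · intro kv hkv
      simp only [pvBump, if_neg h, List.mem_cons] at hkv
      rcases hkv with h1 | h2
      · exact Or.inr ⟨(k', v), by simp, by simp [h1]⟩
      · rcases ih kv h2 with h3 | ⟨kv', h4, h5⟩
        · exact Or.inl h3
        · exact Or.inr ⟨kv', by simp [h4], h5⟩

lemma counter_inv (Q : String → Prop) :
    ∀ (A : List String) (c : List (String × Int)), (∀ s ∈ A, Q s) →
      (c.map Prod.fst).Nodup → (∀ kv ∈ c, Q kv.1) → (∀ kv ∈ c, 1 ≤ kv.2) →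
      ((A.foldl pvBump c).map Prod.fst).Nodup ∧
        (∀ kv ∈ A.foldl pvBump c, Q kv.1) ∧ (∀ kv ∈ A.foldl pvBump c, 1 ≤ kv.2) := by
  intro A
  induction A with
  | nil => intro c _ h1 h2 h3; exact ⟨h1, h2, h3⟩
  | cons s t ih =>
    intro c hQ h1 h2 h3
    simp only [List.foldl_cons]
    refine ih (pvBump c s) (fun x hx => hQ x (List.mem_cons_of_mem _ hx)) ?_ ?_ ?_
    · rw [bump_keys]
      by_cases hm : s ∈ c.map Prod.fst
      · simp [hm, h1]
      · rw [if_neg hm]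
        exact List.Nodup.append h1 (List.nodup_singleton s)
          (List.disjoint_singleton.mpr hm)
    · intro kv hkv
      rcases bump_mem c s kv hkv with ⟨hk, _⟩ | ⟨kv', hm, hk, _⟩
      · exact hk ▸ hQ s (by simp)
      · exact hk ▸ h2 kv' hm
    · intro kv hkv
      rcases bump_mem c s kv hkv with ⟨_, hv⟩ | ⟨kv', hm, _, hv⟩
      · omega
      · have := h3 kv' hm; omega

lemma lookup0_reverse (l : List (String × Int)) (h : (l.map Prod.fst).Nodup) (x : String) :
    pvLookup0 l.reverse x = pvLookup0 l x := by
  induction l with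
  | nil => rfl
  | cons kv t ih =>
    obtain ⟨k, v⟩ := kv
    simp only [List.map_cons, List.nodup_cons, List.mem_map] at h
    obtain ⟨hk, hnd⟩ := h
    by_cases hx : k = x
    · subst hx
      have hnone : (t.reverse.find? (fun p => p.1 == k)) = none := by
        apply List.find?_eq_none.mpr
        intro a ha hc
        exact hk ⟨a, List.mem_reverse.mp ha, by simpa using hc⟩
      simp [pvLookup0, List.find?_append, hnone, List.find?_cons_of_pos]
    · rw [lookup0_cons_of_ne _ _ _ _ hx, ← ih hnd]
      have hnone : (([((k : String), (v : Int))].find? (fun p => p.1 == x))) = none := by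
        simp [hx]
      simp [pvLookup0, List.reverse_cons, List.find?_append, hnone]

-- ===== VERDICT (by name: the statement is the Claim_ definition above) =====
theorem solution_spec : Claim_equal_solution := by
  unfold Claim_equal_solution
  intro A _ hpre
  unfold Spec_solution solution solution_alt
  obtain ⟨hnd, hQ, hpos⟩ := counter_inv (fun s => s ∈ A) A []
    (fun s hs => hs) (by simp) (by simp) (by simp)
  have hlen : ∀ kv ∈ pvCounter A, 2 ≤ kv.1.toList.length :=
    fun kv hkv => hpre.1 kv.1 (hQ kv hkv)
  have hconf : ∀ kv ∈ pvCounter A, ∀ kv' ∈ pvCounter A, pvStrRev kv.1 = kv'.1 →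
      pvSelf kv.1 = true → pvSelf kv'.1 = true := by
    intro kv hkv kv' hkv' hrv hself
    by_contra hc
    exact hpre.2 ⟨kv.1, hQ kv hkv, kv'.1, hQ kv' hkv', hrv,
      fun he => hc (he ▸ hself),
      hself, by revert hc; cases pvSelf kv'.1 <;> simp⟩
  have hndrev : ((pvCounter A).reverse.map Prod.fst).Nodup := by
    rw [List.map_reverse]
    exact List.nodup_reverse.mpr hnd
  have hA := loopA_eq (pvCounter A).reverse.length (pvCounter A).reverse le_rfl
    hndrev (fun kv hkv => hlen kv (List.mem_reverse.mp hkv))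
    (fun kv hkv => hpos kv (List.mem_reverse.mp hkv))
    (fun kv hkv kv' hkv' => hconf kv (List.mem_reverse.mp hkv)
      kv' (List.mem_reverse.mp hkv')) 0 false
  have hB := stepB_foldl (pvCounter A) (pvCounter A) 0 false
  have hS1 : pvS (pvCounter A).reverse (pvCounter A).reverse =
      pvS (pvCounter A) (pvCounter A).reverse :=
    S_congr _ _ _ (fun kv _ _ => lookup0_reverse (pvCounter A) hnd _)
  have hS2 : pvS (pvCounter A) (pvCounter A).reverse = pvS (pvCounter A) (pvCounter A) := by
    simp [pvS, List.map_reverse, List.sum_reverse]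
  have hF : pvF (pvCounter A).reverse = pvF (pvCounter A) := List.any_reverse ..
  simp only [hA, hB, hS1, hS2, hF, Bool.false_or, zero_add]
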